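-- pv_equiv track=rewrite | github.com/thenightcreww/Chandigarh-Jobs | email_verifier.py | filter_career_email
-- ===== SOURCE A (Python) =====
-- def filter_career_email(emails):
--     """Get best career email"""
--     if not emails:
--         return None
--
--     priority = ['career', 'careers', 'hr', 'job', 'jobs', 'recruit', 'talent']
--     exclude = ['noreply', 'no-reply', 'marketing', 'sales', 'support', 'info', 'hello']
--
--     for email in emails:
--         email_lower = email.lower()
--         if any(word in email_lower for word in exclude):
--             continue
--         if any(word in email_lower for word in priority):
--             return email
--
--     for email in emails:
--         if not any(word in email.lower() for word in exclude):
--             return email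
--
--     return None
-- ===== SOURCE B (Python) =====
-- def filter_career_email(emails):
--     """Get best career email"""
--     if not emails:
--         return None
--
--     priority = ['career', 'careers', 'hr', 'job', 'jobs', 'recruit', 'talent']
--     exclude = ['noreply', 'no-reply', 'marketing', 'sales', 'support', 'info', 'hello']
--
--     fallback = None
--     for email in emails:
--         email_lower = email.lower()
--         if any(word in email_lower for word in exclude):
--             continue
--         if any(word in email_lower for word in priority):
--             return email
--         if fallback is None:
--             fallback = email
--     return fallback
-- ===== Notes on version B (the rewrite author's own statement) =====
-- stated objective: alternative
-- what changed: Replaced A's two sequential passes (priority scan, then non-excluded scan) by a single pass that returns immediately on a priority match while maintaining the first non-excluded email as a fallback, lowercasing each email once instead of twice.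
import Mathlib
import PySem

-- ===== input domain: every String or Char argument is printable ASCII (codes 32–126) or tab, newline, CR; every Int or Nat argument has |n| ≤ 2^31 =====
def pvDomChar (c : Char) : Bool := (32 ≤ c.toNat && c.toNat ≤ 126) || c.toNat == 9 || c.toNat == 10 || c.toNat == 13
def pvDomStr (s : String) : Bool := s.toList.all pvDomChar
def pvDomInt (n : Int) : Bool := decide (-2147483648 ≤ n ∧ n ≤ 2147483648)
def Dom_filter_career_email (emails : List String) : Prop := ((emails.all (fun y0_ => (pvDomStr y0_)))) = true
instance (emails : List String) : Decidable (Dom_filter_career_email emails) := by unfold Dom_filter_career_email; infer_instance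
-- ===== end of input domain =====

-- B replaces A's two sequential passes by one pass with a maintained first-non-excluded fallback (alternative decomposition, same cost).

-- ===== PORT A =====
def pvPriority : List String := ["career", "careers", "hr", "job", "jobs", "recruit", "talent"]
def pvExclude : List String := ["noreply", "no-reply", "marketing", "sales", "support", "info", "hello"]

-- first loop of A: first email whose lowercase has no exclude word and some priority word
def pvLoop1 : List String → Option String
  | [] => none
  | email :: rest =>
    let email_lower := PySem.Str.lower email
    if pvExclude.any (fun word => PySem.Str.isIn word email_lower) then pvLoop1 rest
    else if pvPriority.any (fun word => PySem.Str.isIn word email_lower) then some email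
    else pvLoop1 rest

-- second loop of A: first email whose lowercase has no exclude word
def pvLoop2 : List String → Option String
  | [] => none
  | email :: rest =>
    if !(pvExclude.any (fun word => PySem.Str.isIn word (PySem.Str.lower email))) then some email
    else pvLoop2 rest

def filter_career_email (emails : List String) : Option String :=
  if emails.isEmpty then none
  else
    match pvLoop1 emails with
    | some e => some e
    | none => pvLoop2 emails

-- ===== PORT B =====
def pvAltLoop : List String → Option String → Option String
  | [], fallback => fallback
  | email :: rest, fallback =>
    let email_lower := PySem.Str.lower email
    if pvExclude.any (fun word => PySem.Str.isIn word email_lower) then pvAltLoop rest fallback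
    else if pvPriority.any (fun word => PySem.Str.isIn word email_lower) then some email
    else pvAltLoop rest (if fallback.isNone then some email else fallback)

def filter_career_email_alt (emails : List String) : Option String :=
  if emails.isEmpty then none
  else pvAltLoop emails none

-- ===== PRECONDITION & SPEC =====
def Spec_filter_career_email (emails : List String) (out : Option String) : Prop := out = filter_career_email_alt emails
instance (emails : List String) (out : Option String) : Decidable (Spec_filter_career_email emails out) := by unfold Spec_filter_career_email; infer_instance

-- ===== CLAIM (what is proved, stated in full; the proofs are below) =====
def Claim_equal_filter_career_email : Prop := ∀ (emails : List String), Dom_filter_career_email emails → Spec_filter_career_email emails (filter_career_email emails)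

-- ===== LEMMAS AND PROOFS =====
theorem pvAltLoop_eq (es : List String) (fb : Option String) :
    pvAltLoop es fb =
      match pvLoop1 es with
      | some e => some e
      | none => match fb with
                | some f => some f
                | none => pvLoop2 es := by
  induction es generalizing fb with
  | nil => cases fb <;> rfl
  | cons email rest ih =>
    simp only [pvAltLoop, pvLoop1, pvLoop2]
    by_cases hex : pvExclude.any (fun word => PySem.Str.isIn word (PySem.Str.lower email)) = true
    · simp only [hex, if_true, ih, Bool.not_true, Bool.false_eq_true, if_false]
    · simp only [Bool.not_eq_true] at hex
      simp only [hex, Bool.false_eq_true, if_false, Bool.not_false, if_true]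
      by_cases hpr : pvPriority.any (fun word => PySem.Str.isIn word (PySem.Str.lower email)) = true
      · simp only [hpr, if_true]
      · simp only [Bool.not_eq_true] at hpr
        simp only [hpr, Bool.false_eq_true, if_false, ih]
        cases fb <;> rfl

-- ===== VERDICT (by name: the statement is the Claim_ definition above) =====
theorem filter_career_email_spec : Claim_equal_filter_career_email := by
  intro emails _
  unfold Spec_filter_career_email filter_career_email filter_career_email_alt
  by_cases h : emails.isEmpty
  · simp [h]
  · simp only [h, pvAltLoop_eq]
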